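-- pv_equiv track=rewrite | github.com/MohammedAbbassi/TitanIDS | TitanIDS-H/titanids_h/detectors/persistence.py | extract_exe_path
-- ===== SOURCE A (Python) =====
-- def extract_exe_path(s: str) -> str | None:
--     t = (s or "").strip()
--     if '"' in t and ',' in t:
--         fields = []
--         buf = ""
--         in_q = False
--         for ch in t:
--             if ch == '"':
--                 in_q = not in_q
--                 continue
--             if ch == ',' and not in_q:
--                 fields.append(buf)
--                 buf = ""
--             else:
--                 buf += ch
--         if buf:
--             fields.append(buf)
--         exe_field = next((f for f in fields if ".exe" in f.lower()), "")
--         if exe_field: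
--             return exe_field.strip().strip('"')
--     return None
-- ===== SOURCE B (Python) =====
-- def extract_exe_path(s: str) -> str | None:
--     t = (s or "").strip()
--     if '"' not in t or ',' not in t:
--         return None
--     pieces = t.split('"')
--     fields = []
--     cur = ""
--     k = 0
--     while k < len(pieces):
--         parts = pieces[k].split(',')
--         cur += parts[0]
--         for p in parts[1:]:
--             fields.append(cur)
--             cur = p
--         if k + 1 < len(pieces):
--             cur += pieces[k + 1]
--         k += 2
--     if cur:
--         fields.append(cur)
--     for f in fields:
--         if ".exe" in f.lower():
--             return f.strip().strip('"')
--     return None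
-- ===== Notes on version B (the rewrite author's own statement) =====
-- stated objective: alternative
-- what changed: Replaced the character-by-character quote/comma state machine with a single split on the double-quote character followed by a walk over the pieces two at a time (comma-splitting the outside pieces, appending the quoted pieces verbatim) and a plain linear-search loop for the executable field instead of next() over a generator.
import Mathlib
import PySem

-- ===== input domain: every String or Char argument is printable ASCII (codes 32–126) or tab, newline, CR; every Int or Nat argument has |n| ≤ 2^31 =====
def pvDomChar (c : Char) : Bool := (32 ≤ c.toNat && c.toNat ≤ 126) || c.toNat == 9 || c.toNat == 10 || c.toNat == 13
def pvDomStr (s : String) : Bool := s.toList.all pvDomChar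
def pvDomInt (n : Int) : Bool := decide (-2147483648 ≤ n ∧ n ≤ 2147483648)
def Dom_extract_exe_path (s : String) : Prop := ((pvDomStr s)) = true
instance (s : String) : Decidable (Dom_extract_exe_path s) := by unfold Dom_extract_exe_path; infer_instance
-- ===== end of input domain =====

-- B replaces A's char-by-char quote/comma state machine by splitting on '"' once and walking
-- the resulting pieces two at a time (outside piece comma-split, inside piece appended verbatim),
-- then a plain linear search for the '.exe' field: a different decomposition, same results.

-- ===== PORT A =====
-- A's loop body: state = (fields, buf, in_q)
def pvStepA (acc : List (List Char) × List Char × Bool) (ch : Char) :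
    List (List Char) × List Char × Bool :=
  if ch = '"' then (acc.1, acc.2.1, !acc.2.2)
  else if ch = ',' ∧ acc.2.2 = false then (acc.1 ++ [acc.2.1], [], acc.2.2)
  else (acc.1, acc.2.1 ++ [ch], acc.2.2)

def extract_exe_path (s : String) : Option String :=
  let t := PySem.Str.strip s
  if PySem.Str.isIn "\"" t && PySem.Str.isIn "," t then
    let st := t.toList.foldl pvStepA ([], [], false)
    let fields := if st.2.1 ≠ [] then st.1 ++ [st.2.1] else st.1
    let exe_field := (fields.find? (fun f => PySem.Chars.isIn ".exe".toList (PySem.Chars.lower f))).getD []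
    if exe_field ≠ [] then
      some (String.ofList (PySem.Chars.stripChars (PySem.Chars.strip exe_field) ['"']))
    else none
  else none

-- ===== PORT B =====
-- B's inner loop: feed one outside piece into the current field, emitting a completed field at
-- every comma (piece.split(',') ported as List.splitOn ',', Python str.split one-char separator)
def pvFeed (cur : List Char) (o : List Char) : List (List Char) × List Char :=
  match o.splitOn ',' with
  | [] => ([], cur)   -- unreachable: splitOn never returns []
  | p :: ps => ps.foldl (fun st q => (st.1 ++ [st.2], q)) ([], cur ++ p)

-- B's outer loop: pieces taken two at a time (outside, inside); the final `if cur:` append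
def pvScan : List (List Char) → List Char → List (List Char)
  | [], cur => if cur ≠ [] then [cur] else []
  | [o], cur =>
      (pvFeed cur o).1 ++ (if (pvFeed cur o).2 ≠ [] then [(pvFeed cur o).2] else [])
  | o :: i :: rest, cur => (pvFeed cur o).1 ++ pvScan rest ((pvFeed cur o).2 ++ i)

-- B's final loop: first field containing '.exe' case-insensitively
def pvFirstExe : List (List Char) → Option (List Char)
  | [] => none
  | f :: rest =>
      if PySem.Chars.isIn ".exe".toList (PySem.Chars.lower f) then some f else pvFirstExe rest

def extract_exe_path_alt (s : String) : Option String :=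
  let t := PySem.Str.strip s
  if PySem.Str.isIn "\"" t = false ∨ PySem.Str.isIn "," t = false then none
  else
    match pvFirstExe (pvScan (t.toList.splitOn '"') []) with
    | some f => some (String.ofList (PySem.Chars.stripChars (PySem.Chars.strip f) ['"']))
    | none => none

-- ===== PRECONDITION & SPEC =====
def Spec_extract_exe_path (s : String) (out : Option String) : Prop := out = extract_exe_path_alt s
instance (s : String) (out : Option String) : Decidable (Spec_extract_exe_path s out) := by unfold Spec_extract_exe_path; infer_instance

-- ===== CLAIM (what is proved, stated in full; the proofs are below) =====
def Claim_equal_extract_exe_path : Prop := ∀ (s : String), Dom_extract_exe_path s → Spec_extract_exe_path s (extract_exe_path s)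

-- ===== LEMMAS AND PROOFS =====

-- proof-side: the fields A keeps after the loop and the final `if buf:` append
def pvFin (st : List (List Char) × List Char × Bool) : List (List Char) :=
  if st.2.1 ≠ [] then st.1 ++ [st.2.1] else st.1

-- proof-side: pvScan entered at an inside piece (A's in_q = true state)
def pvScanIn : List (List Char) → List Char → List (List Char)
  | [], cur => if cur ≠ [] then [cur] else []
  | i :: rest, cur => pvScan rest (cur ++ i)

theorem pvFeed_fold_prefix (l : List (List Char)) (fs : List (List Char)) (cur : List Char) :
    l.foldl (fun st q => (st.1 ++ [st.2], q)) (fs, cur)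
      = (fs ++ (l.foldl (fun st q => (st.1 ++ [st.2], q)) ([], cur)).1,
         (l.foldl (fun st q => (st.1 ++ [st.2], q)) ([], cur)).2) := by
  induction l generalizing fs cur with
  | nil => simp
  | cons a l ih =>
    simp only [List.foldl, List.nil_append]
    rw [ih (fs ++ [cur]) a, ih [cur] a]
    simp

theorem pvFeed_cons (buf : List Char) (d : Char) (h : List Char) :
    pvFeed buf (d :: h)
      = if d = ',' then ((buf :: (pvFeed [] h).1, (pvFeed [] h).2))
        else pvFeed (buf ++ [d]) h := by
  obtain ⟨q0, qs, hq⟩ := List.exists_cons_of_ne_nil (List.splitOnP_ne_nil (· == ',') h)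
  have hq2 : h.splitOn ',' = q0 :: qs := by simpa [List.splitOn] using hq
  by_cases hd : d = ','
  · subst hd
    have hs : (',' :: h).splitOn ',' = [] :: q0 :: qs := by
      simp [List.splitOn, List.splitOnP_cons, hq]
    simp only [pvFeed, hs, hq2, List.foldl, List.append_nil, List.nil_append, if_pos]
    rw [pvFeed_fold_prefix qs [buf] q0]
    simp
  · have hs : (d :: h).splitOn ',' = (d :: q0) :: qs := by
      simp [List.splitOn, List.splitOnP_cons, hd]
      simpa [List.splitOn] using congrArg (List.modifyHead (d :: ·)) hq
    simp [pvFeed, hs, hq2, hd]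

theorem pvFeed_nil (buf : List Char) : pvFeed buf [] = ([], buf) := by
  simp [pvFeed, List.splitOn, List.splitOnP_nil]

theorem pvScan_cons (qs : List (List Char)) (q0 buf : List Char) (d : Char) :
    pvScan ((d :: q0) :: qs) buf
      = if d = ',' then buf :: pvScan (q0 :: qs) [] else pvScan (q0 :: qs) (buf ++ [d]) := by
  cases qs with
  | nil =>
    by_cases hd : d = ','
    · subst hd; simp [pvScan, pvFeed_cons]
    · simp [pvScan, pvFeed_cons, hd]
  | cons i rest =>
    by_cases hd : d = ','
    · subst hd; simp [pvScan, pvFeed_cons]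
    · simp [pvScan, pvFeed_cons, hd]

-- A's char scan followed by its final append equals B's piece scan, in both quote parities
theorem pvKey (cs : List Char) (fs : List (List Char)) (buf : List Char) :
    (pvFin (cs.foldl pvStepA (fs, buf, false)) = fs ++ pvScan (cs.splitOn '"') buf)
    ∧ (pvFin (cs.foldl pvStepA (fs, buf, true)) = fs ++ pvScanIn (cs.splitOn '"') buf) := by
  induction cs generalizing fs buf with
  | nil =>
    constructor
    · simp only [List.foldl, List.splitOn, List.splitOnP_nil, pvScan, pvFeed_nil, pvFin]
      by_cases hb : buf = [] <;> simp [hb]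
    · simp only [List.foldl, List.splitOn, List.splitOnP_nil, pvScanIn, pvScan, pvFin,
        List.append_nil]
      by_cases hb : buf = [] <;> simp [hb]
  | cons c cs ih =>
    obtain ⟨q0, qs, hq⟩ := List.exists_cons_of_ne_nil (List.splitOnP_ne_nil (· == '"') cs)
    by_cases hc : c = '"'
    · subst hc
      have hs : ('"' :: cs).splitOn '"' = [] :: cs.splitOn '"' := by
        simp [List.splitOn, List.splitOnP_cons]
      constructor
      · rw [show List.foldl pvStepA (fs, buf, false) ('"' :: cs)
              = List.foldl pvStepA (fs, buf, true) cs by simp [List.foldl, pvStepA]]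
        rw [hs, List.splitOn] at *
        rw [show pvScan ([] :: List.splitOnP (· == '"') cs) buf
              = pvScanIn (List.splitOnP (· == '"') cs) buf by
          rw [hq]
          cases qs <;> simp [pvScan, pvScanIn, pvFeed_nil]]
        exact (ih fs buf).2
      · rw [show List.foldl pvStepA (fs, buf, true) ('"' :: cs)
              = List.foldl pvStepA (fs, buf, false) cs by simp [List.foldl, pvStepA]]
        rw [hs]
        rw [show pvScanIn ([] :: cs.splitOn '"') buf = pvScan (cs.splitOn '"') buf by
          simp [pvScanIn]]
        exact (ih fs buf).1
    · have hsplit : (c :: cs).splitOn '"' = (c :: q0) :: qs := by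
        simp [List.splitOn, List.splitOnP_cons, hc]
        simpa [List.splitOn] using congrArg (List.modifyHead (c :: ·)) hq
      have hq' : cs.splitOn '"' = q0 :: qs := by simpa [List.splitOn] using hq
      constructor
      · by_cases hcomma : c = ','
        · subst hcomma
          rw [show List.foldl pvStepA (fs, buf, false) (',' :: cs)
                = List.foldl pvStepA (fs ++ [buf], [], false) cs by
            simp [List.foldl, pvStepA]]
          rw [hsplit, pvScan_cons, if_pos rfl, ← hq']
          rw [(ih (fs ++ [buf]) []).1]
          simp
        · rw [show List.foldl pvStepA (fs, buf, false) (c :: cs)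
                = List.foldl pvStepA (fs, buf ++ [c], false) cs by
            simp [List.foldl, pvStepA, hc, hcomma]]
          rw [hsplit, pvScan_cons, if_neg hcomma, ← hq']
          exact (ih fs (buf ++ [c])).1
      · rw [show List.foldl pvStepA (fs, buf, true) (c :: cs)
              = List.foldl pvStepA (fs, buf ++ [c], true) cs by
          simp [List.foldl, pvStepA, hc]]
        rw [hsplit]
        have h2 := (ih fs (buf ++ [c])).2
        rw [hq'] at h2
        simpa [pvScanIn, List.append_assoc] using h2

-- B's search is List.find? with A's predicate
theorem pvFirstExe_eq_find? (l : List (List Char)) :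
    pvFirstExe l = l.find? (fun f => PySem.Chars.isIn ".exe".toList (PySem.Chars.lower f)) := by
  induction l with
  | nil => rfl
  | cons f rest ih =>
    simp only [pvFirstExe, List.find?]
    cases PySem.Chars.isIn ".exe".toList (PySem.Chars.lower f) <;> simp [ih]

-- a field containing '.exe' is nonempty
theorem pvExe_ne_nil (f : List Char)
    (h : PySem.Chars.isIn ".exe".toList (PySem.Chars.lower f) = true) : f ≠ [] := by
  intro hf; subst hf; exact absurd h (by decide)

-- A's exe-field-then-strip tail equals B's match on pvFirstExe, for any field list
theorem pvTail (fields : List (List Char)) :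
    (if ((fields.find? (fun f => PySem.Chars.isIn ".exe".toList (PySem.Chars.lower f))).getD []) ≠ [] then
       some (String.ofList (PySem.Chars.stripChars (PySem.Chars.strip
         ((fields.find? (fun f => PySem.Chars.isIn ".exe".toList (PySem.Chars.lower f))).getD [])) ['"']))
     else none)
    = (match pvFirstExe fields with
       | some f => some (String.ofList (PySem.Chars.stripChars (PySem.Chars.strip f) ['"']))
       | none => none) := by
  rw [← pvFirstExe_eq_find?]
  cases hfind : pvFirstExe fields with
  | none => simp
  | some f =>
    have hf : PySem.Chars.isIn ".exe".toList (PySem.Chars.lower f) = true := by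
      rw [pvFirstExe_eq_find?] at hfind
      exact List.find?_some (p := fun f => PySem.Chars.isIn ".exe".toList (PySem.Chars.lower f)) hfind
    simp [pvExe_ne_nil f hf]

-- ===== VERDICT (by name: the statement is the Claim_ definition above) =====
set_option maxHeartbeats 1000000 in
theorem extract_exe_path_spec : Claim_equal_extract_exe_path := by
  intro s _
  show extract_exe_path s = extract_exe_path_alt s
  simp only [extract_exe_path, extract_exe_path_alt]
  by_cases h1 : PySem.Str.isIn "\"" (PySem.Str.strip s) = true
  · by_cases h2 : PySem.Str.isIn "," (PySem.Str.strip s) = true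
    · simp only [h1, h2, Bool.and_self, if_true, Bool.true_eq_false, or_self, if_false]
      rw [pvTail]
      have hfields := (pvKey (PySem.Str.strip s).toList [] []).1
      simp only [pvFin, List.nil_append] at hfields
      rw [hfields]
    · have h2' : PySem.Chars.isIn [','] (PySem.Chars.strip s.toList) = false := by
        simpa using h2
      simp [h2']
  · have h1' : PySem.Chars.isIn ['"'] (PySem.Chars.strip s.toList) = false := by
      simpa using h1
    simp [h1']
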